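-- pv_equiv track=rewrite | github.com/RenderKit/embree | scripts/cpp-patch.py | parse_expr_list
-- ===== SOURCE A (Python) =====
-- def parse_expr_list(tokens,tpos,term_token):
--   expr = []
--   while (tpos < len(tokens)):
--
--     if tokens[tpos] == term_token:
--       return (expr,tpos)
--
--     elif tokens[tpos] == "(":
--       tpos+=1
--       (e,tpos) = parse_expr_list(tokens,tpos,")")
--       expr = expr + ["("] + e + [")"]
--       tpos+=1
--
--     elif tokens[tpos] == "{":
--       tpos+=1
--       (e,tpos) = parse_expr_list(tokens,tpos,"}")
--       expr = expr + ["{"] + e + ["}"]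
--       tpos+=1
--
--     else:
--       expr.append(tokens[tpos])
--       tpos+=1
--
--   raise ValueError()
-- ===== SOURCE B (Python) =====
-- def parse_expr_list(tokens, tpos, term_token):
--     # Iterative reformulation: an explicit stack of (parent_expr, parent_term)
--     # frames replaces A's recursion; one linear scan over the tokens.
--     expr = []
--     term = term_token
--     stack = []
--     while tpos < len(tokens):
--         tok = tokens[tpos]
--         if tok == term:
--             if not stack:
--                 return (expr, tpos)
--             parent, pterm = stack.pop()
--             expr = parent + ["(" if term == ")" else "{"] + expr + [term]
--             term = pterm
--         elif tok == "(":
--             stack.append((expr, term))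
--             expr = []
--             term = ")"
--         elif tok == "{":
--             stack.append((expr, term))
--             expr = []
--             term = "}"
--         else:
--             expr.append(tok)
--         tpos += 1
--     raise ValueError()
-- ===== Notes on version B (the rewrite author's own statement) =====
-- stated objective: alternative
-- what changed: A's recursive-descent parser (recursion on each '('/'{') is replaced by a single iterative scan with an explicit stack of (parent_expr, parent_term) frames.
import Mathlib
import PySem

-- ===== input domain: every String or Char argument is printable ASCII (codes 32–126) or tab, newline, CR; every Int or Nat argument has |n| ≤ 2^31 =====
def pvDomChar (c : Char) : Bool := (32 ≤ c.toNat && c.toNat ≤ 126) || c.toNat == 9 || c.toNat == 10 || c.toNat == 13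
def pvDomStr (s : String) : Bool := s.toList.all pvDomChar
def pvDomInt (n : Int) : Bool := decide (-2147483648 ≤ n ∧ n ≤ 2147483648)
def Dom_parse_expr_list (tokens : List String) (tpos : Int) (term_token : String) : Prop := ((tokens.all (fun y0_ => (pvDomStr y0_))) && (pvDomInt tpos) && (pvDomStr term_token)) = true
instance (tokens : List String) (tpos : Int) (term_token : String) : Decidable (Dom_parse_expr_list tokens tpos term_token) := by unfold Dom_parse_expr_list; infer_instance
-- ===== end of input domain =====

-- B replaces A's recursive-descent parser by one iterative scan with an explicit
-- stack of (parent_expr, parent_term) frames (objective: alternative decomposition).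
-- Where the Python raises (terminator never reached: bare ValueError; tpos < -len:
-- IndexError) both ports return the dummy ([], 0); those inputs are outside Pre_.

-- ===== PORT A =====
-- A's while-loop becomes a tail recursion on the accumulator `expr`; the two
-- recursive calls of A are the nested `pvParseA` calls.  One fuel unit per loop
-- iteration / recursive entry; the wrapper supplies fuel that the proof shows is
-- never exhausted on Pre_ inputs.
def pvParseA (tokens : List String) (term : String) (tpos : Int) (expr : List String) :
    Nat → List String × Int
  | 0 => ([], 0)
  | fuel + 1 =>
    if tpos < (tokens.length : Int) then
      match PySem.List.pyGet? tokens tpos with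
      | none => ([], 0)          -- IndexError (tpos < -len)
      | some tok =>
        if tok = term then (expr, tpos)
        else if tok = "(" then
          let r := pvParseA tokens ")" (tpos + 1) [] fuel
          pvParseA tokens term (r.2 + 1) (expr ++ ["("] ++ r.1 ++ [")"]) fuel
        else if tok = "{" then
          let r := pvParseA tokens "}" (tpos + 1) [] fuel
          pvParseA tokens term (r.2 + 1) (expr ++ ["{"] ++ r.1 ++ ["}"]) fuel
        else pvParseA tokens term (tpos + 1) (expr ++ [tok]) fuel
    else ([], 0)                 -- raise ValueError()

def parse_expr_list (tokens : List String) (tpos : Int) (term_token : String) : List String × Int :=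
  pvParseA tokens term_token tpos [] ((tokens.length - tpos).toNat + 1)

-- ===== PORT B =====
-- Source B's loop: state (tpos, expr, term, stack), one fuel unit per iteration.
def pvParseB (tokens : List String) (tpos : Int) (expr : List String) (term : String)
    (stack : List (List String × String)) : Nat → List String × Int
  | 0 => ([], 0)
  | fuel + 1 =>
    if tpos < (tokens.length : Int) then
      match PySem.List.pyGet? tokens tpos with
      | none => ([], 0)          -- IndexError (tpos < -len)
      | some tok =>
        if tok = term then
          match stack with
          | [] => (expr, tpos)
          | (parent, pterm) :: st =>
            pvParseB tokens (tpos + 1)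
              (parent ++ [if term = ")" then "(" else "{"] ++ expr ++ [term]) pterm st fuel
        else if tok = "(" then
          pvParseB tokens (tpos + 1) [] ")" ((expr, term) :: stack) fuel
        else if tok = "{" then
          pvParseB tokens (tpos + 1) [] "}" ((expr, term) :: stack) fuel
        else pvParseB tokens (tpos + 1) (expr ++ [tok]) term stack fuel
    else ([], 0)                 -- raise ValueError()

def parse_expr_list_alt (tokens : List String) (tpos : Int) (term_token : String) : List String × Int :=
  pvParseB tokens tpos [] term_token [] ((tokens.length - tpos).toNat + 1)

-- ===== PRECONDITION & SPEC =====
-- Whether A returns at all is an inherently inductive property of the input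
-- (the expected terminator is reached through the bracket nesting before the
-- tokens run out).  pvOk is a minimal closer-stack reachability scanner stating
-- exactly that; it tracks no expression and no result, unlike either port.
def pvOk (tokens : List String) (tpos : Int) (terms : List String) : Nat → Bool
  | 0 => false
  | fuel + 1 =>
    match terms with
    | [] => false
    | term :: rest =>
      if tpos < (tokens.length : Int) then
        match PySem.List.pyGet? tokens tpos with
        | none => false
        | some tok =>
          if tok = term then (match rest with | [] => true | _ => pvOk tokens (tpos + 1) rest fuel)
          else if tok = "(" then pvOk tokens (tpos + 1) (")" :: term :: rest) fuel
          else if tok = "{" then pvOk tokens (tpos + 1) ("}" :: term :: rest) fuel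
          else pvOk tokens (tpos + 1) (term :: rest) fuel
      else false

-- Pre_ = exactly the inputs on which the Python A returns normally: the
-- terminator is reachable (no ValueError and no IndexError on the way).
def Pre_parse_expr_list (tokens : List String) (tpos : Int) (term_token : String) : Prop :=
  pvOk tokens tpos [term_token] ((tokens.length - tpos).toNat + 1) = true
instance (tokens : List String) (tpos : Int) (term_token : String) : Decidable (Pre_parse_expr_list tokens tpos term_token) := by unfold Pre_parse_expr_list; infer_instance

def pvWitness_parse_expr_list : List String × Int × String := (["a", "(", "b", ")", ";"], 0, ";")

def Spec_parse_expr_list (tokens : List String) (tpos : Int) (term_token : String) (out : List String × Int) : Prop := out = parse_expr_list_alt tokens tpos term_token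
instance (tokens : List String) (tpos : Int) (term_token : String) (out : List String × Int) : Decidable (Spec_parse_expr_list tokens tpos term_token out) := by unfold Spec_parse_expr_list; infer_instance

-- ===== CLAIM (what is proved, stated in full; the proofs are below) =====
def Claim_equal_parse_expr_list : Prop := ∀ (tokens : List String) (tpos : Int) (term_token : String), Dom_parse_expr_list tokens tpos term_token → Pre_parse_expr_list tokens tpos term_token → Spec_parse_expr_list tokens tpos term_token (parse_expr_list tokens tpos term_token)

-- ===== LEMMAS AND PROOFS =====

-- Big-step derivations of A's recursive grammar: `PvEval n tpos term e p` means
-- parsing from `tpos` up to terminator `term` yields expression `e`, stopping at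
-- the terminator position `p`, consuming exactly `n` token positions.
inductive PvEval (tokens : List String) : Nat → Int → String → List String → Int → Prop
  | found (tpos : Int) (term : String)
      (h1 : tpos < (tokens.length : Int))
      (h2 : PySem.List.pyGet? tokens tpos = some term) :
      PvEval tokens 0 tpos term [] tpos
  | paren {n1 n2 : Nat} {tpos p1 p2 : Int} {term : String} {e1 e2 : List String}
      (h1 : tpos < (tokens.length : Int))
      (h2 : PySem.List.pyGet? tokens tpos = some "(") (hne : "(" ≠ term)
      (d1 : PvEval tokens n1 (tpos + 1) ")" e1 p1)
      (d2 : PvEval tokens n2 (p1 + 1) term e2 p2) :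
      PvEval tokens (n1 + n2 + 2) tpos term (["("] ++ e1 ++ [")"] ++ e2) p2
  | brace {n1 n2 : Nat} {tpos p1 p2 : Int} {term : String} {e1 e2 : List String}
      (h1 : tpos < (tokens.length : Int))
      (h2 : PySem.List.pyGet? tokens tpos = some "{") (hne : "{" ≠ term)
      (d1 : PvEval tokens n1 (tpos + 1) "}" e1 p1)
      (d2 : PvEval tokens n2 (p1 + 1) term e2 p2) :
      PvEval tokens (n1 + n2 + 2) tpos term (["{"] ++ e1 ++ ["}"] ++ e2) p2
  | other {n : Nat} {tpos p : Int} {term tok : String} {e : List String}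
      (h1 : tpos < (tokens.length : Int))
      (h2 : PySem.List.pyGet? tokens tpos = some tok)
      (ht : tok ≠ term) (hp : tok ≠ "(") (hb : tok ≠ "{")
      (d : PvEval tokens n (tpos + 1) term e p) :
      PvEval tokens (n + 1) tpos term (tok :: e) p

theorem pvEval_facts {tokens : List String} {n : Nat} {tpos p : Int} {term : String}
    {e : List String} (d : PvEval tokens n tpos term e p) :
    tpos + n = p ∧ p < (tokens.length : Int) ∧ PySem.List.pyGet? tokens p = some term := by
  induction d with
  | found tpos term h1 h2 => exact ⟨by omega, h1, h2⟩
  | paren h1 h2 hne d1 d2 ih1 ih2 => exact ⟨by omega, ih2.2.1, ih2.2.2⟩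
  | brace h1 h2 hne d1 d2 ih1 ih2 => exact ⟨by omega, ih2.2.1, ih2.2.2⟩
  | other h1 h2 ht hp hb d ih => exact ⟨by omega, ih.2.1, ih.2.2⟩

-- Port A computes any derivable result (for every sufficient fuel).
theorem pvParseA_eval {tokens : List String} {n : Nat} {tpos p : Int} {term : String}
    {e : List String} (d : PvEval tokens n tpos term e p) :
    ∀ (expr : List String) (fuel : Nat), n < fuel →
      pvParseA tokens term tpos expr fuel = (expr ++ e, p) := by
  induction d with
  | found tpos term h1 h2 =>
    intro expr fuel hf
    obtain ⟨f, rfl⟩ : ∃ f, fuel = f + 1 := ⟨fuel - 1, by omega⟩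
    simp [pvParseA, h1, h2]
  | @paren n1 n2 tpos p1 p2 term e1 e2 h1 h2 hne d1 d2 ih1 ih2 =>
    intro expr fuel hf
    obtain ⟨f, rfl⟩ : ∃ f, fuel = f + 1 := ⟨fuel - 1, by omega⟩
    have r1 := ih1 [] f (by omega)
    have r2 : ∀ e', pvParseA tokens term (p1 + 1) e' f = (e' ++ e2, p2) :=
      fun e' => ih2 e' f (by omega)
    simp only [pvParseA, h1, if_pos, h2]
    rw [if_neg (by simpa using hne)]
    rw [r1]
    simp [r2, List.append_assoc]
  | @brace n1 n2 tpos p1 p2 term e1 e2 h1 h2 hne d1 d2 ih1 ih2 =>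
    intro expr fuel hf
    obtain ⟨f, rfl⟩ : ∃ f, fuel = f + 1 := ⟨fuel - 1, by omega⟩
    have r1 := ih1 [] f (by omega)
    have r2 : ∀ e', pvParseA tokens term (p1 + 1) e' f = (e' ++ e2, p2) :=
      fun e' => ih2 e' f (by omega)
    simp only [pvParseA, h1, if_pos, h2]
    rw [if_neg (by simpa using hne)]
    rw [r1]
    simp [r2, List.append_assoc]
  | @other n tpos p term tok e h1 h2 ht hp hb d ih =>
    intro expr fuel hf
    obtain ⟨f, rfl⟩ : ∃ f, fuel = f + 1 := ⟨fuel - 1, by omega⟩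
    have r : ∀ e', pvParseA tokens term (tpos + 1) e' f = (e' ++ e, p) :=
      fun e' => ih e' f (by omega)
    simp only [pvParseA, h1, if_pos, h2]
    rw [if_neg ht, if_neg hp, if_neg hb]
    simp [r]

-- Port B's loop traverses a derivation: n iterations move it from the start of
-- the derivation to the terminator position, with the expression accumulated.
theorem pvParseB_eval {tokens : List String} {n : Nat} {tpos p : Int} {term : String}
    {e : List String} (d : PvEval tokens n tpos term e p) :
    ∀ (expr : List String) (stack : List (List String × String)) (fuel : Nat),
      pvParseB tokens tpos expr term stack (n + fuel) = pvParseB tokens p (expr ++ e) term stack fuel := by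
  induction d with
  | found tpos term h1 h2 => intro expr stack fuel; simp
  | @paren n1 n2 tpos p1 p2 term e1 e2 h1 h2 hne d1 d2 ih1 ih2 =>
    intro expr stack fuel
    obtain ⟨hp1a, hp1len, hget1⟩ := pvEval_facts d1
    generalize hG : n2 + fuel + 1 = G
    have harith : n1 + n2 + 2 + fuel = (n1 + G) + 1 := by omega
    rw [harith]
    simp only [pvParseB, h1, if_pos, h2]
    rw [if_neg (by simpa using hne)]
    rw [ih1 [] ((expr, term) :: stack) G, ← hG]
    have harith2 : n2 + fuel + 1 = (n2 + fuel) + 1 := rfl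
    rw [harith2]
    simp only [pvParseB, List.nil_append, hp1len, if_pos, hget1]
    simp [ih2, List.append_assoc]
  | @brace n1 n2 tpos p1 p2 term e1 e2 h1 h2 hne d1 d2 ih1 ih2 =>
    intro expr stack fuel
    obtain ⟨hp1a, hp1len, hget1⟩ := pvEval_facts d1
    generalize hG : n2 + fuel + 1 = G
    have harith : n1 + n2 + 2 + fuel = (n1 + G) + 1 := by omega
    rw [harith]
    simp only [pvParseB, h1, if_pos, h2]
    rw [if_neg (by simpa using hne)]
    rw [ih1 [] ((expr, term) :: stack) G, ← hG]
    have harith2 : n2 + fuel + 1 = (n2 + fuel) + 1 := rfl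
    rw [harith2]
    simp only [pvParseB, List.nil_append, hp1len, if_pos, hget1]
    simp [ih2, List.append_assoc]
  | @other n tpos p term tok e h1 h2 ht hp hb d ih =>
    intro expr stack fuel
    have harith : n + 1 + fuel = (n + fuel) + 1 := by omega
    rw [harith]
    simp only [pvParseB, h1, if_pos, h2]
    rw [if_neg ht, if_neg hp, if_neg hb]
    simp [ih]

-- Pre_'s reachability scanner admits only inputs with a derivation.
theorem pvOk_eval (tokens : List String) :
    ∀ (fuel : Nat) (tpos : Int) (term : String) (terms : List String),
      pvOk tokens tpos (term :: terms) fuel = true →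
      ∃ n e p, PvEval tokens n tpos term e p ∧
        (terms = [] ∨ pvOk tokens (p + 1) terms (fuel - (n + 1)) = true) := by
  intro fuel
  induction fuel using Nat.strong_induction_on with
  | _ fuel ih =>
    intro tpos term terms h
    obtain ⟨f, rfl⟩ : ∃ f, fuel = f + 1 := by
      cases fuel with
      | zero => simp [pvOk] at h
      | succ f => exact ⟨f, rfl⟩
    simp only [pvOk] at h
    by_cases hlt : tpos < (tokens.length : Int)
    · rw [if_pos hlt] at h
      cases hget : PySem.List.pyGet? tokens tpos with
      | none => rw [hget] at h; simp at h
      | some tok =>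
        rw [hget] at h
        dsimp only at h
        by_cases htok : tok = term
        · subst htok
          rw [if_pos rfl] at h
          refine ⟨0, [], tpos, PvEval.found tpos tok hlt hget, ?_⟩
          cases terms with
          | nil => exact Or.inl rfl
          | cons t ts => exact Or.inr (by simpa using h)
        · rw [if_neg htok] at h
          by_cases hpar : tok = "("
          · subst hpar
            rw [if_pos rfl] at h
            obtain ⟨n1, e1, p1, d1, hrest⟩ := ih f (by omega) (tpos + 1) ")" (term :: terms) h
            have hok1 : pvOk tokens (p1 + 1) (term :: terms) (f - (n1 + 1)) = true := by
              rcases hrest with h' | h'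
              · exact absurd h' (by simp)
              · exact h'
            obtain ⟨n2, e2, p2, d2, hrest2⟩ := ih (f - (n1 + 1)) (by omega) (p1 + 1) term terms hok1
            refine ⟨n1 + n2 + 2, _, p2, PvEval.paren hlt hget htok d1 d2, ?_⟩
            rcases hrest2 with h' | h'
            · exact Or.inl h'
            · refine Or.inr ?_
              have : f + 1 - (n1 + n2 + 2 + 1) = f - (n1 + 1) - (n2 + 1) := by omega
              rw [this]; exact h'
          · rw [if_neg hpar] at h
            by_cases hbr : tok = "{"
            · subst hbr
              rw [if_pos rfl] at h
              obtain ⟨n1, e1, p1, d1, hrest⟩ := ih f (by omega) (tpos + 1) "}" (term :: terms) h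
              have hok1 : pvOk tokens (p1 + 1) (term :: terms) (f - (n1 + 1)) = true := by
                rcases hrest with h' | h'
                · exact absurd h' (by simp)
                · exact h'
              obtain ⟨n2, e2, p2, d2, hrest2⟩ := ih (f - (n1 + 1)) (by omega) (p1 + 1) term terms hok1
              refine ⟨n1 + n2 + 2, _, p2, PvEval.brace hlt hget htok d1 d2, ?_⟩
              rcases hrest2 with h' | h'
              · exact Or.inl h'
              · refine Or.inr ?_
                have : f + 1 - (n1 + n2 + 2 + 1) = f - (n1 + 1) - (n2 + 1) := by omega
                rw [this]; exact h'
            · rw [if_neg hbr] at h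
              obtain ⟨n1, e1, p1, d1, hrest⟩ := ih f (by omega) (tpos + 1) term terms h
              refine ⟨n1 + 1, _, p1, PvEval.other hlt hget htok hpar hbr d1, ?_⟩
              rcases hrest with h' | h'
              · exact Or.inl h'
              · refine Or.inr ?_
                have : f + 1 - (n1 + 1 + 1) = f - (n1 + 1) := by omega
                rw [this]; exact h'
    · rw [if_neg hlt] at h; simp at h

-- ===== VERDICT (by name: the statement is the Claim_ definition above) =====
theorem parse_expr_list_spec : Claim_equal_parse_expr_list := by
  intro tokens tpos term_token _ hPre
  unfold Pre_parse_expr_list at hPre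
  obtain ⟨n, e, p, d, -⟩ := pvOk_eval tokens _ tpos term_token [] hPre
  obtain ⟨hnp, hplen, hgetp⟩ := pvEval_facts d
  have hn : n + 1 < (tokens.length - tpos).toNat + 1 := by omega
  unfold Spec_parse_expr_list parse_expr_list parse_expr_list_alt
  rw [pvParseA_eval d [] _ (by omega)]
  obtain ⟨k, hk⟩ : ∃ k, (tokens.length - tpos).toNat + 1 = n + (k + 1) := ⟨(tokens.length - tpos).toNat - n, by omega⟩
  rw [hk, pvParseB_eval d [] []]
  simp [pvParseB, hplen, hgetp]
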